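-- pv_equiv track=rewrite | github.com/JungleBlame/Python-tasks | CodeWars/itertools.py | loopy
-- ===== SOURCE A (Python) =====
-- def loopy(num):
--
--     FLAMES= ["F","L","A","M","E","S"]
--     index=0
--     result=""
--
--     while num !=0:
--         if index>5:
--             index=0
--
--         result=FLAMES[index]
--
--         index+=1
--         num-=1
--
--     return result
-- ===== SOURCE B (Python) =====
-- def loopy(num):
--     # O(1): the loop's final write is FLAMES[(num-1) % 6]; empty string when the loop never runs.
--     if num == 0:
--         return ""
--     return ["F", "L", "A", "M", "E", "S"][(num - 1) % 6]
-- ===== Notes on version B (the rewrite author's own statement) =====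
-- stated objective: faster
-- what changed: Replaces the num-iteration cycling loop with the closed form FLAMES[(num-1) % 6] (empty for num == 0).
import Mathlib
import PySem

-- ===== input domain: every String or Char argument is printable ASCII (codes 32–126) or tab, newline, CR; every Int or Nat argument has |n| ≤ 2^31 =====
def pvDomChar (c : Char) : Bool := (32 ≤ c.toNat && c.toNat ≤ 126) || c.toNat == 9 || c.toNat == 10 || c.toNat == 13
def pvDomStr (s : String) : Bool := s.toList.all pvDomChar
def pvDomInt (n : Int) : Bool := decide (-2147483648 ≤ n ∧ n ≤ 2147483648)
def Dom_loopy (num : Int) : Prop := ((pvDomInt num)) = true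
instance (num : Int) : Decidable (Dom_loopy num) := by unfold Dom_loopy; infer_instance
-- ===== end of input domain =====

-- B replaces A's num-iteration cycling loop with the O(1) closed form FLAMES[(num-1) % 6] ("" for num = 0).

-- ===== PORT A =====
def pvFLAMES : List String := ["F", "L", "A", "M", "E", "S"]

-- the while loop, step for step, on fuel = number of remaining iterations (num counts down to 0)
def loopyGo : Nat → Nat → String → String
  | 0, _, result => result
  | n + 1, index, _ =>
    let index := if index > 5 then 0 else index
    let result := pvFLAMES.getD index ""
    loopyGo n (index + 1) result

def loopy (num : Int) : String := loopyGo num.toNat 0 ""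

-- ===== PORT B =====
def loopy_alt (num : Int) : String :=
  if num = 0 then "" else pvFLAMES.getD (PySem.Int.mod (num - 1) 6).toNat ""

-- ===== PRECONDITION & SPEC =====
-- Pre_ excludes num < 0, on which A's while loop never terminates (num only decreases past 0).
def Pre_loopy (num : Int) : Prop := 0 ≤ num
instance (num : Int) : Decidable (Pre_loopy num) := by unfold Pre_loopy; infer_instance
def pvWitness_loopy : Int := 7
def Spec_loopy (num : Int) (out : String) : Prop := out = loopy_alt num
instance (num : Int) (out : String) : Decidable (Spec_loopy num out) := by unfold Spec_loopy; infer_instance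

-- ===== CLAIM =====
def Claim_equal_loopy : Prop := ∀ (num : Int), Dom_loopy num → Pre_loopy num → Spec_loopy num (loopy num)

-- ===== LEMMAS AND PROOFS =====

-- loop invariant: with 1 ≤ n iterations left and index ≤ 6, the final result is FLAMES[(index + n - 1) % 6]
theorem loopyGo_closed (n index : Nat) (r : String) (hi : index ≤ 6) (hn : 1 ≤ n) :
    loopyGo n index r = pvFLAMES.getD ((index + n - 1) % 6) "" := by
  induction n generalizing index r with
  | zero => omega
  | succ n ih =>
    rcases Nat.eq_zero_or_pos n with h0 | h1
    · subst h0
      simp only [loopyGo]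
      by_cases h : index > 5
      · have : index = 6 := by omega
        subst this
        simp
      · simp only [if_neg h]
        congr 1
        omega
    · simp only [loopyGo]
      by_cases h : index > 5
      · have h6 : index = 6 := by omega
        subst h6
        rw [if_pos h, ih 1 _ (by omega) h1]
        congr 1
        omega
      · rw [if_neg h, ih (index + 1) _ (by omega) h1]
        congr 1
        omega

-- ===== VERDICT =====
theorem loopy_spec : Claim_equal_loopy := by
  intro num _ hpre
  unfold Pre_loopy at hpre
  unfold Spec_loopy loopy loopy_alt
  by_cases h0 : num = 0
  · subst h0; simp [loopyGo]
  · have hpos : 1 ≤ num := by omega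
    rw [if_neg h0, loopyGo_closed _ 0 "" (by omega) (by omega)]
    congr 1
    have hmod : PySem.Int.mod (num - 1) 6 = (num - 1) % 6 := by
      simp [PySem.Int.mod, Int.fmod_eq_emod]
    rw [hmod]
    omega
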